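-- pv_equiv track=rewrite | github.com/rudraprsd/pymatgen | pymatgen/io/feff/inputs.py | pot_dict_from_str
-- ===== SOURCE A (Python) =====
-- def pot_dict_from_str(pot_data):
--     """
--     Creates atomic symbol/potential number dictionary
--     forward and reverse.
--
--     Args:
--         pot_data: potential data in string format
--
--     Returns:
--         forward and reverse atom symbol and potential number dictionaries.
--     """
--     pot_dict = {}
--     pot_dict_reverse = {}
--     begin = 0
--     ln = -1
--
--     for line in pot_data.split("\n"):
--         try:
--             if begin == 0 and line.split()[0] == "0":
--                 begin += 1
--                 ln = 0
--             if begin == 1: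
--                 ln += 1
--             if ln > 0:
--                 atom = line.split()[2]
--                 index = int(line.split()[0])
--                 pot_dict[atom] = index
--                 pot_dict_reverse[index] = atom
--         except (ValueError, IndexError):
--             pass
--     return pot_dict, pot_dict_reverse
-- ===== SOURCE B (Python) =====
-- def pot_dict_from_str(pot_data):
--     """
--     Creates atomic symbol/potential number dictionary
--     forward and reverse.
--
--     Args:
--         pot_data: potential data in string format
--
--     Returns:
--         forward and reverse atom symbol and potential number dictionaries.
--     """
--     lines = pot_data.split("\n")
--     start = None
--     for i, line in enumerate(lines):
--         toks = line.split()
--         if toks and toks[0] == "0":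
--             start = i
--             break
--     pot_dict = {}
--     pot_dict_reverse = {}
--     if start is None:
--         return pot_dict, pot_dict_reverse
--     for line in lines[start:]:
--         toks = line.split()
--         try:
--             atom = toks[2]
--             index = int(toks[0])
--         except (ValueError, IndexError):
--             continue
--         pot_dict[atom] = index
--         pot_dict_reverse[index] = atom
--     return pot_dict, pot_dict_reverse
-- ===== Notes on version B (the rewrite author's own statement) =====
-- stated objective: alternative
-- what changed: Replaced A's single pass with begin/ln sentinel counters by a two-phase decomposition: first scan for the index of the marker line (first line whose first token is "0"), then parse only the tail slice from that line on; each line's tokens are split once instead of three times.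
import Mathlib
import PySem

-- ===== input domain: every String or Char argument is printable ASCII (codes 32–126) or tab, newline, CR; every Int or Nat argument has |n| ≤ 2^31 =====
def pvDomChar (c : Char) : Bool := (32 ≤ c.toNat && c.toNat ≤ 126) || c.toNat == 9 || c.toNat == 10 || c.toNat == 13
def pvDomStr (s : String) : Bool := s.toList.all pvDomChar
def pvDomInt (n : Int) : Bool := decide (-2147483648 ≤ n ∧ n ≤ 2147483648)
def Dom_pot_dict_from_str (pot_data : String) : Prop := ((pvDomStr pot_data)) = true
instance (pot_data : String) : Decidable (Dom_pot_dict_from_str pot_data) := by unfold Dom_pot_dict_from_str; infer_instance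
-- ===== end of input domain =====

-- B replaces A's single pass with begin/ln counters by a find-the-"0"-marker scan followed by a parse of the tail slice (alternative decomposition, same cost).


-- ===== PORT A =====
-- the body of A's try: atom = line.split()[2]; index = int(line.split()[0]); both dict assignments
-- (an IndexError/ValueError leaves the dicts unchanged but keeps the already-mutated begin/ln)
def potTryA (d : PySem.Dict String Int) (r : PySem.Dict Int String) (b ln : Int)
    (toks : List String) : PySem.Dict String Int × PySem.Dict Int String × Int × Int :=
  match PySem.List.pyGet? toks 2 with
  | none => (d, r, b, ln)
  | some atom =>
    match PySem.List.pyGet? toks 0 with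
    | none => (d, r, b, ln)
    | some t0 =>
      match PySem.Int.ofStr? t0 with
      | none => (d, r, b, ln)
      | some index => (d.insert atom index, r.insert index atom, b, ln)

-- one iteration of A's loop over a line, state (pot_dict, pot_dict_reverse, begin, ln)
def potStepA (st : PySem.Dict String Int × PySem.Dict Int String × Int × Int)
    (line : String) : PySem.Dict String Int × PySem.Dict Int String × Int × Int :=
  let (d, r, begin_, ln) := st
  let toks := PySem.Str.split₀ line
  if begin_ == 0 then
    match PySem.List.pyGet? toks 0 with
    | none => (d, r, begin_, ln)          -- IndexError on line.split()[0]
    | some t0 =>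
      if t0 == "0" then
        let begin' := begin_ + 1
        let ln' := (0 : Int) + 1          -- ln = 0, then begin == 1 so ln += 1
        if ln' > 0 then potTryA d r begin' ln' toks else (d, r, begin', ln')
      else (d, r, begin_, ln)
  else
    let ln' := ln + 1                     -- begin == 1: ln += 1
    if ln' > 0 then potTryA d r begin_ ln' toks else (d, r, begin_, ln')

def pot_dict_from_str (pot_data : String) : (List (String × Int)) × (List (Int × String)) :=
  let fin := ((PySem.Str.split? pot_data "\n").getD []).foldl potStepA
      (PySem.Dict.empty, PySem.Dict.empty, (0 : Int), (-1 : Int))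
  (fin.1.items, fin.2.1.items)

-- ===== PORT B =====
-- first loop of B: index of the first line whose split() is non-empty with token 0 == "0"
def potFindMarker : List String → Option Nat
  | [] => none
  | l :: rest =>
    let toks := PySem.Str.split₀ l
    if toks ≠ [] ∧ PySem.List.pyGet? toks 0 = some "0" then some 0
    else (potFindMarker rest).map (· + 1)

-- second loop of B: try atom = toks[2]; index = int(toks[0]); except continue; then both assignments
def potProcB (p : PySem.Dict String Int × PySem.Dict Int String) (line : String) :
    PySem.Dict String Int × PySem.Dict Int String :=
  let toks := PySem.Str.split₀ line
  match PySem.List.pyGet? toks 2 with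
  | none => p
  | some atom =>
    match PySem.List.pyGet? toks 0 with
    | none => p
    | some t0 =>
      match PySem.Int.ofStr? t0 with
      | none => p
      | some index => (p.1.insert atom index, p.2.insert index atom)

def pot_dict_from_str_alt (pot_data : String) : (List (String × Int)) × (List (Int × String)) :=
  let lines := (PySem.Str.split? pot_data "\n").getD []
  match potFindMarker lines with
  | none => ([], [])
  | some start =>
    let fin := (lines.drop start).foldl potProcB (PySem.Dict.empty, PySem.Dict.empty)
    (fin.1.items, fin.2.items)

-- ===== PRECONDITION & SPEC =====
def Spec_pot_dict_from_str (pot_data : String) (out : (List (String × Int)) × (List (Int × String))) : Prop := out = pot_dict_from_str_alt pot_data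
instance (pot_data : String) (out : (List (String × Int)) × (List (Int × String))) : Decidable (Spec_pot_dict_from_str pot_data out) := by unfold Spec_pot_dict_from_str; infer_instance

-- ===== CLAIM (what is proved, stated in full; the proofs are below) =====
def Claim_equal_pot_dict_from_str : Prop := ∀ (pot_data : String), Dom_pot_dict_from_str pot_data → Spec_pot_dict_from_str pot_data (pot_dict_from_str pot_data)

-- ===== LEMMAS AND PROOFS =====

-- A's try body and B's try body parse a line the same way; only the carried counters differ
theorem potTryA_eq (d : PySem.Dict String Int) (r : PySem.Dict Int String) (b ln : Int)
    (l : String) :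
    potTryA d r b ln (PySem.Str.split₀ l) =
      ((potProcB (d, r) l).1, (potProcB (d, r) l).2, b, ln) := by
  simp only [potTryA, potProcB]
  cases PySem.List.pyGet? (PySem.Str.split₀ l) 2 with
  | none => rfl
  | some atom =>
    cases PySem.List.pyGet? (PySem.Str.split₀ l) 0 with
    | none => rfl
    | some t0 =>
      simp only []
      cases PySem.Int.ofStr? t0 <;> rfl

-- one step of A's loop in the post-marker state (begin = 1, positive ln) is one step of B's parse loop
theorem potStepA_post (d : PySem.Dict String Int) (r : PySem.Dict Int String) (ln : Int)
    (h : 0 < ln) (l : String) :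
    potStepA (d, r, 1, ln) l = ((potProcB (d, r) l).1, (potProcB (d, r) l).2, 1, ln + 1) := by
  have hb : ((1 : Int) == 0) = false := rfl
  simp only [potStepA, hb, Bool.false_eq_true, if_false, if_pos (by omega : ln + 1 > 0)]
  exact potTryA_eq d r 1 (ln + 1) l

-- once begin = 1 and ln > 0, A's loop is B's parse loop with the counter ticking up
theorem foldA_post (ls : List String) (d : PySem.Dict String Int) (r : PySem.Dict Int String)
    (ln : Int) (h : 0 < ln) :
    ls.foldl potStepA (d, r, 1, ln) =
      ((ls.foldl potProcB (d, r)).1, (ls.foldl potProcB (d, r)).2, 1, ln + ls.length) := by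
  induction ls generalizing d r ln with
  | nil => simp
  | cons l ls ih =>
    rw [List.foldl_cons, potStepA_post d r ln h l, ih _ _ _ (by omega)]
    simp only [List.foldl_cons, List.length_cons, Prod.mk.injEq, Nat.cast_add, Nat.cast_one]
    refine ⟨trivial, trivial, trivial, ?_⟩; ring

-- main invariant: A's fold from the initial state computes B's find-marker-then-parse result
theorem foldA_main (ls : List String) (d : PySem.Dict String Int) (r : PySem.Dict Int String) :
    (let f := ls.foldl potStepA (d, r, 0, -1); (f.1, f.2.1)) =
      (match potFindMarker ls with
       | none => (d, r)
       | some i => (ls.drop i).foldl potProcB (d, r)) := by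
  induction ls generalizing d r with
  | nil => simp [potFindMarker]
  | cons l ls ih =>
    by_cases hm : PySem.List.pyGet? (PySem.Str.split₀ l) 0 = some "0"
    · -- marker line: A switches to begin = 1, ln = 1 and parses this line too
      have htoks : PySem.Str.split₀ l ≠ [] := by
        intro he; rw [he] at hm; simp [PySem.List.pyGet?] at hm
      have hfind : potFindMarker (l :: ls) = some 0 := by
        simp [potFindMarker, htoks, hm]
      have hstep : potStepA (d, r, 0, -1) l =
          ((potProcB (d, r) l).1, (potProcB (d, r) l).2, 1, 1) := by
        have hb : ((0 : Int) == 0) = true := rfl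
        simp only [potStepA, hm, hb, if_true, show ((0 : Int) + 1 > 0) = True by norm_num]
        exact potTryA_eq d r (0 + 1) (0 + 1) l
      simp only [List.foldl_cons, hstep, hfind]
      rw [foldA_post ls _ _ 1 (by omega)]
      simp
    · -- non-marker line: state unchanged, marker searched in the tail
      have hstep : potStepA (d, r, 0, -1) l = (d, r, 0, -1) := by
        have hb : ((0 : Int) == 0) = true := rfl
        simp only [potStepA, hb, if_true]
        cases hg : PySem.List.pyGet? (PySem.Str.split₀ l) 0 with
        | none => rfl
        | some t0 =>
          have hne : (t0 == "0") = false := by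
            simp only [beq_eq_false_iff_ne, ne_eq]
            intro he; exact hm (by rw [hg, he])
          simp [hne]
      have hfind : potFindMarker (l :: ls) = (potFindMarker ls).map (fun n => n + 1) := by
        simp only [potFindMarker]
        split
        · next h => exact absurd h.2 hm
        · rfl
      simp only [List.foldl_cons, hstep, hfind]
      rw [ih]
      cases potFindMarker ls <;> simp

-- ===== VERDICT (by name: the statement is the Claim_ definition above) =====
theorem pot_dict_from_str_spec : Claim_equal_pot_dict_from_str := by
  intro pot_data _
  unfold Spec_pot_dict_from_str pot_dict_from_str pot_dict_from_str_alt
  have h := foldA_main ((PySem.Str.split? pot_data "\n").getD []) PySem.Dict.empty PySem.Dict.empty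
  simp only at h ⊢
  cases hf : potFindMarker ((PySem.Str.split? pot_data "\n").getD []) with
  | none =>
    rw [hf] at h
    have h1 := congrArg Prod.fst h
    have h2 := congrArg Prod.snd h
    simp only at h1 h2
    rw [h1, h2]
    rfl
  | some i =>
    rw [hf] at h
    have h1 := congrArg Prod.fst h
    have h2 := congrArg Prod.snd h
    simp only at h1 h2
    rw [h1, h2]
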